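-- pv_equiv track=rewrite | github.com/jjgordon89/skills | skills/bobdevibecoder/unbrowse/lib/har_parser.py | _detect_auth
-- ===== SOURCE A (Python) =====
-- from typing import Optional
--
-- def _detect_auth(headers: list[dict]) -> tuple[Optional[str], Optional[str]]:
--     """Detect authentication type from request headers."""
--     for h in headers:
--         name = h.get("name", "").lower()
--         value = h.get("value", "")
--         if name == "authorization":
--             if value.lower().startswith("bearer "):
--                 return "bearer", "Authorization"
--             elif value.lower().startswith("basic "):
--                 return "basic", "Authorization"
--             else:
--                 return "custom", "Authorization"
--         if name == "x-api-key":
--             return "api_key", "X-API-Key"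
--         if name in ("x-auth-token", "x-access-token"):
--             return "api_key", h.get("name", "")
--     # Check for cookie-based auth
--     for h in headers:
--         if h.get("name", "").lower() == "cookie":
--             cookie_val = h.get("value", "")
--             if any(k in cookie_val for k in ["session", "token", "auth", "sid"]):
--                 return "cookie", "Cookie"
--     return None, None
-- ===== SOURCE B (Python) =====
-- from typing import Optional
--
-- def _classify(h):
--     """Rank a header: (0, result) for a direct auth header, (1, result) for a
--     keyword-bearing cookie, None otherwise."""
--     name = h.get("name", "").lower()
--     if name == "authorization":
--         v = h.get("value", "").lower()
--         if v.startswith("bearer "):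
--             return (0, ("bearer", "Authorization"))
--         if v.startswith("basic "):
--             return (0, ("basic", "Authorization"))
--         return (0, ("custom", "Authorization"))
--     if name == "x-api-key":
--         return (0, ("api_key", "X-API-Key"))
--     if name in ("x-auth-token", "x-access-token"):
--         return (0, ("api_key", h.get("name", "")))
--     if name == "cookie" and any(k in h.get("value", "") for k in ("session", "token", "auth", "sid")):
--         return (1, ("cookie", "Cookie"))
--     return None
--
-- def _detect_auth(headers: list[dict]) -> tuple[Optional[str], Optional[str]]:
--     """Detect authentication type: fold back-to-front, an earlier header wins
--     when its rank is at least as good as the best seen so far."""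
--     best = None
--     for h in reversed(headers):
--         c = _classify(h)
--         if c is not None and (best is None or c[0] == 0 or best[0] == 1):
--             best = c
--     return best[1] if best is not None else (None, None)
-- ===== Notes on version B (the rewrite author's own statement) =====
-- stated objective: alternative
-- what changed: Replaced A's two sequential early-return scans by a classify-and-rank reduction: each header is mapped to an optional (rank, result) by a pure classifier, and one backwards fold keeps the best-ranked (ties broken toward the earlier header), so auth-over-cookie priority falls out of the rank order instead of pass order.
import Mathlib
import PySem

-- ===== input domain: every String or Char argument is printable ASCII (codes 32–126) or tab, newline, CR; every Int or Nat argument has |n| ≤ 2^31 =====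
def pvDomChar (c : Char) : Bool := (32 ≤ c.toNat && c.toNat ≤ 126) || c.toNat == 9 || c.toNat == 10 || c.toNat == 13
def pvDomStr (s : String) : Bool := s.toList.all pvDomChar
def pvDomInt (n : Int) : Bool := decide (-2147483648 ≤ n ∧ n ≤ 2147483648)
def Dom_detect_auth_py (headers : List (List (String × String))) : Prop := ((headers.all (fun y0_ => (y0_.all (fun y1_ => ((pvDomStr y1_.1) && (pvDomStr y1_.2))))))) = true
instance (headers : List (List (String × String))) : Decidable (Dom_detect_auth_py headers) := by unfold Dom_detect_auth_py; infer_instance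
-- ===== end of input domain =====

-- B replaces A's two sequential scans by a per-header rank classifier folded back-to-front; objective: alternative decomposition.


-- ===== PORT A =====
-- first for-loop of A: auth-header scan (some r = early return)
def pvA_loop1 : List (List (String × String)) → Option (Option String × Option String)
  | [] => none
  | h :: rest =>
    let name := PySem.Str.lower ((PySem.Dict.mk h).getD "name" "")
    let value := (PySem.Dict.mk h).getD "value" ""
    if name == "authorization" then
      if PySem.Str.startswith (PySem.Str.lower value) "bearer " then
        some (some "bearer", some "Authorization")
      else if PySem.Str.startswith (PySem.Str.lower value) "basic " then
        some (some "basic", some "Authorization")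
      else
        some (some "custom", some "Authorization")
    else if name == "x-api-key" then some (some "api_key", some "X-API-Key")
    else if name == "x-auth-token" || name == "x-access-token" then
      some (some "api_key", some ((PySem.Dict.mk h).getD "name" ""))
    else pvA_loop1 rest

-- second for-loop of A: cookie scan
def pvA_loop2 : List (List (String × String)) → Option (Option String × Option String)
  | [] => none
  | h :: rest =>
    if PySem.Str.lower ((PySem.Dict.mk h).getD "name" "") == "cookie" then
      let cookie_val := (PySem.Dict.mk h).getD "value" ""
      if (["session", "token", "auth", "sid"].any (fun k => PySem.Str.isIn k cookie_val)) then
        some (some "cookie", some "Cookie")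
      else pvA_loop2 rest
    else pvA_loop2 rest

def detect_auth_py (headers : List (List (String × String))) : Option String × Option String :=
  match pvA_loop1 headers with
  | some r => r
  | none =>
    match pvA_loop2 headers with
    | some r => r
    | none => (none, none)

-- ===== PORT B =====
-- _classify: rank 0 = direct auth header, rank 1 = keyword-bearing cookie, none otherwise
def pvB_classify (h : List (String × String)) : Option (Int × (Option String × Option String)) :=
  let name := PySem.Str.lower ((PySem.Dict.mk h).getD "name" "")
  if name == "authorization" then
    let v := PySem.Str.lower ((PySem.Dict.mk h).getD "value" "")
    if PySem.Str.startswith v "bearer " then some (0, (some "bearer", some "Authorization"))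
    else if PySem.Str.startswith v "basic " then some (0, (some "basic", some "Authorization"))
    else some (0, (some "custom", some "Authorization"))
  else if name == "x-api-key" then some (0, (some "api_key", some "X-API-Key"))
  else if name == "x-auth-token" || name == "x-access-token" then
    some (0, (some "api_key", some ((PySem.Dict.mk h).getD "name" "")))
  else if name == "cookie" &&
      (["session", "token", "auth", "sid"].any
        (fun k => PySem.Str.isIn k ((PySem.Dict.mk h).getD "value" ""))) then
    some (1, (some "cookie", some "Cookie"))
  else none

-- loop body of B: the earlier header (processed later in the reversed fold) wins
-- when its rank is at least as good as the best seen so far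
def pvB_step (best : Option (Int × (Option String × Option String)))
    (h : List (String × String)) : Option (Int × (Option String × Option String)) :=
  match pvB_classify h with
  | none => best
  | some c =>
    match best with
    | none => some c
    | some b => if c.1 == 0 || b.1 == 1 then some c else best

def detect_auth_py_alt (headers : List (List (String × String))) : Option String × Option String :=
  match headers.reverse.foldl pvB_step none with
  | some b => b.2
  | none => (none, none)

-- ===== PRECONDITION & SPEC =====
def Spec_detect_auth_py (headers : List (List (String × String))) (out : Option String × Option String) : Prop := out = detect_auth_py_alt headers
instance (headers : List (List (String × String))) (out : Option String × Option String) : Decidable (Spec_detect_auth_py headers out) := by unfold Spec_detect_auth_py; infer_instance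

-- ===== CLAIM (what is proved, stated in full; the proofs are below) =====
def Claim_equal_detect_auth_py : Prop := ∀ (headers : List (List (String × String))), Dom_detect_auth_py headers → Spec_detect_auth_py headers (detect_auth_py headers)

-- ===== LEMMAS AND PROOFS =====

-- the backwards fold, read as a foldr, encodes A's two loops: rank 0 = loop1's result, rank 1 = loop2's
theorem pvB_foldr_eq (hs : List (List (String × String))) :
    hs.foldr (fun h acc => pvB_step acc h) none =
      match pvA_loop1 hs with
      | some r => some ((0 : Int), r)
      | none =>
        match pvA_loop2 hs with
        | some r => some ((1 : Int), r)
        | none => none := by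
  induction hs with
  | nil => rfl
  | cons h rest ih =>
    rw [List.foldr_cons, ih]
    simp only [pvB_step, pvB_classify, pvA_loop1, pvA_loop2]
    by_cases h1 : (PySem.Str.lower ((PySem.Dict.mk h).getD "name" "") == "authorization") = true
    · simp only [if_pos h1]
      split_ifs <;> (cases pvA_loop1 rest with
        | some r => rfl
        | none => cases pvA_loop2 rest <;> rfl)
    · simp only [if_neg h1]
      by_cases h2 : (PySem.Str.lower ((PySem.Dict.mk h).getD "name" "") == "x-api-key") = true
      · simp only [if_pos h2]
        cases pvA_loop1 rest with
        | some r => rfl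
        | none => cases pvA_loop2 rest <;> rfl
      · simp only [if_neg h2]
        by_cases h3 : (PySem.Str.lower ((PySem.Dict.mk h).getD "name" "") == "x-auth-token"
            || PySem.Str.lower ((PySem.Dict.mk h).getD "name" "") == "x-access-token") = true
        · simp only [if_pos h3]
          cases pvA_loop1 rest with
          | some r => rfl
          | none => cases pvA_loop2 rest <;> rfl
        · simp only [if_neg h3]
          by_cases hc : (PySem.Str.lower ((PySem.Dict.mk h).getD "name" "") == "cookie") = true
          · simp only [if_pos hc]
            by_cases hk : ((["session", "token", "auth", "sid"].any
                (fun k => PySem.Str.isIn k ((PySem.Dict.mk h).getD "value" "")))) = true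
            · simp only [hk, hc, Bool.true_and, if_true]
              cases pvA_loop1 rest with
              | some r => rfl
              | none => cases pvA_loop2 rest <;> rfl
            · simp only [hk, Bool.and_false, Bool.false_eq_true, if_false]
          · have hcf : (PySem.Str.lower ((PySem.Dict.mk h).getD "name" "") == "cookie"
                && (["session", "token", "auth", "sid"].any
                  (fun k => PySem.Str.isIn k ((PySem.Dict.mk h).getD "value" "")))) = false := by
              rw [Bool.and_eq_false_iff]; left; simpa using hc
            simp only [hcf, Bool.false_eq_true, if_false, if_neg hc]

-- ===== VERDICT (by name: the statement is the Claim_ definition above) =====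
theorem detect_auth_py_spec : Claim_equal_detect_auth_py := by
  intro headers _
  unfold Spec_detect_auth_py detect_auth_py detect_auth_py_alt
  rw [List.foldl_reverse, pvB_foldr_eq]
  cases pvA_loop1 headers with
  | some r => rfl
  | none => cases pvA_loop2 headers <;> rfl
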